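-- pv_equiv track=rewrite | github.com/MatthewGordon5/Portfolio | BSc Final Year Project/Code.py | possible_cell_values
-- ===== SOURCE A (Python) =====
-- def possible_cell_values(combinations):
--
--     possible_numbers = []
--
--     for combination in combinations:
--         for num in combination:
--             possible_numbers.append(num)
--
--
--     # We only want each possibility to appear once
--
--     unique_possible_numbers = []
--
--     for number in possible_numbers:
--         if number not in unique_possible_numbers:
--             unique_possible_numbers.append(number)
--
--     # We want them sorting into order
--     unique_possible_numbers.sort()
--
--     return unique_possible_numbers
-- ===== SOURCE B (Python) =====
-- def possible_cell_values(combinations):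
--     flat = [num for combination in combinations for num in combination]
--     flat.sort()
--     result = []
--     for num in flat:
--         if not result or result[-1] != num:
--             result.append(num)
--     return result
-- ===== Notes on version B (the rewrite author's own statement) =====
-- stated objective: faster
-- what changed: Replaces A's O(n^2) membership-scan dedup followed by a sort with a flatten, one sort, and a single linear pass that drops adjacent duplicates.
import Mathlib
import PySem

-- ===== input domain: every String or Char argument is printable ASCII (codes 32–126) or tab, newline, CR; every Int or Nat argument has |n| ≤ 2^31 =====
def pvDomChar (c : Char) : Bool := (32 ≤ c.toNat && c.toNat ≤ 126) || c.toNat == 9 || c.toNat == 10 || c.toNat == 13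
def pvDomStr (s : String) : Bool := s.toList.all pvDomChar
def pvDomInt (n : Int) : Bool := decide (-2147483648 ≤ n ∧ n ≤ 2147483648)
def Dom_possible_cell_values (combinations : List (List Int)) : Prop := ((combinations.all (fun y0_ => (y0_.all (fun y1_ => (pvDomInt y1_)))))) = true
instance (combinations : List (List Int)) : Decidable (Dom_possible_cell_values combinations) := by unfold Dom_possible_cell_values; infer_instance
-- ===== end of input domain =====

-- B replaces A's quadratic membership-scan dedup then sort with flatten, one sort,
-- and a single linear pass dropping adjacent duplicates (objective: faster).

-- ===== PORT A =====
def possible_cell_values (combinations : List (List Int)) : List Int :=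
  -- for combination in combinations: for num in combination: possible_numbers.append(num)
  let possible_numbers :=
    combinations.foldl (fun acc combination =>
      combination.foldl (fun acc2 num => acc2 ++ [num]) acc) []
  -- for number in possible_numbers: if number not in unique: unique.append(number)
  let unique_possible_numbers :=
    possible_numbers.foldl (fun u number => if number ∈ u then u else u ++ [number]) []
  -- unique_possible_numbers.sort()
  PySem.List.sorted unique_possible_numbers (fun x => x) false

-- ===== PORT B =====
def possible_cell_values_alt (combinations : List (List Int)) : List Int :=
  -- flat = [num for combination in combinations for num in combination]
  let flat := combinations.flatMap (fun combination => combination)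
  -- flat.sort()
  let sortedFlat := PySem.List.sorted flat (fun x => x) false
  -- for num in sortedFlat: if not result or result[-1] != num: result.append(num)
  sortedFlat.foldl (fun result num =>
    if result = [] ∨ result.getLast? ≠ some num then result ++ [num] else result) []

-- ===== PRECONDITION & SPEC =====
def Spec_possible_cell_values (combinations : List (List Int)) (out : List Int) : Prop := out = possible_cell_values_alt combinations
instance (combinations : List (List Int)) (out : List Int) : Decidable (Spec_possible_cell_values combinations out) := by unfold Spec_possible_cell_values; infer_instance

-- ===== CLAIM (what is proved, stated in full; the proofs are below) =====
def Claim_equal_possible_cell_values : Prop := ∀ (combinations : List (List Int)), Dom_possible_cell_values combinations → Spec_possible_cell_values combinations (possible_cell_values combinations)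

-- ===== LEMMAS AND PROOFS =====

-- A's append-flatten foldl produces the flattened list
lemma pvA_flatten (combinations : List (List Int)) (init : List Int) :
    combinations.foldl (fun acc c => c.foldl (fun a n => a ++ [n]) acc) init
      = init ++ combinations.flatMap (fun c => c) := by
  induction combinations generalizing init with
  | nil => simp
  | cons c cs ih =>
    simp only [List.foldl_cons]
    rw [ih]
    simp
    induction c <;> simp_all

-- A's dedup foldl keeps the first occurrences: nodup + same membership
lemma pvA_dedup_spec (xs acc : List Int) (hacc : acc.Nodup) :
    (xs.foldl (fun u n => if n ∈ u then u else u ++ [n]) acc).Nodup ∧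
    (∀ y, y ∈ xs.foldl (fun u n => if n ∈ u then u else u ++ [n]) acc ↔ y ∈ acc ∨ y ∈ xs) := by
  induction xs generalizing acc with
  | nil => simpa using hacc
  | cons x xs ih =>
    simp only [List.foldl_cons]
    by_cases hx : x ∈ acc
    · obtain ⟨h1, h2⟩ := ih acc hacc
      simp only [if_pos hx]
      refine ⟨h1, fun y => ?_⟩
      rw [h2]
      simp only [List.mem_cons]
      constructor
      · rintro (h | h)
        · exact Or.inl h
        · exact Or.inr (Or.inr h)
      · rintro (h | rfl | h)
        · exact Or.inl h
        · exact Or.inl hx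
        · exact Or.inr h
    · obtain ⟨h1, h2⟩ := ih (acc ++ [x]) (by
        refine List.pairwise_append.mpr ⟨hacc, List.pairwise_singleton _ _, ?_⟩
        intro a ha b hb
        simp only [List.mem_singleton] at hb
        exact fun he => hx ((hb ▸ he) ▸ ha))
      simp only [if_neg hx]
      refine ⟨h1, fun y => ?_⟩
      rw [h2]
      simp [or_assoc]

-- in a strictly increasing list every element is ≤ the last
lemma pvLast_max (acc : List Int) (h : acc.Pairwise (· < ·)) (l : Int)
    (hl : acc.getLast? = some l) : ∀ a ∈ acc, a ≤ l := by
  induction acc with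
  | nil => simp at hl
  | cons b bs ih =>
    cases bs with
    | nil =>
      simp at hl; subst hl; simp
    | cons c cs =>
      rw [List.getLast?_cons_cons] at hl
      intro a ha
      rcases List.mem_cons.mp ha with rfl | ha'
      · have hcl : c ≤ l := ih (List.Pairwise.of_cons h) hl c (by simp)
        have : a < c := (List.pairwise_cons.mp h).1 c (by simp)
        omega
      · exact ih (List.Pairwise.of_cons h) hl a ha'

-- B's adjacent-dedup pass over a ≤-sorted list: strictly increasing result, same membership
lemma pvB_pass_spec (xs acc : List Int) (hxs : xs.Pairwise (· ≤ ·))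
    (hacc : acc.Pairwise (· < ·)) (hle : ∀ a ∈ acc, ∀ x ∈ xs, a ≤ x) :
    (xs.foldl (fun r n => if r = [] ∨ r.getLast? ≠ some n then r ++ [n] else r) acc).Pairwise (· < ·) ∧
    (∀ y, y ∈ xs.foldl (fun r n => if r = [] ∨ r.getLast? ≠ some n then r ++ [n] else r) acc ↔ y ∈ acc ∨ y ∈ xs) := by
  induction xs generalizing acc with
  | nil => simpa using hacc
  | cons x xs ih =>
    have hxs' := List.Pairwise.of_cons hxs
    have hxle : ∀ z ∈ xs, x ≤ z := (List.pairwise_cons.mp hxs).1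
    simp only [List.foldl_cons]
    by_cases hc : acc = [] ∨ acc.getLast? ≠ some x
    · -- append x
      have hlt : ∀ a ∈ acc, a < x := by
        intro a ha
        rcases hc with hnil | hne
        · simp [hnil] at ha
        · obtain ⟨l, hl⟩ := Option.isSome_iff_exists.mp (List.getLast?_isSome.mpr (List.ne_nil_of_mem ha))
          have hal := pvLast_max acc hacc l hl a ha
          have hlx : l ≤ x := hle l (List.mem_of_getLast? hl) x (by simp)
          have : l ≠ x := fun h => hne (h ▸ hl)
          omega
      have hacc' : (acc ++ [x]).Pairwise (· < ·) := by
        refine List.pairwise_append.mpr ⟨hacc, List.pairwise_singleton _ _, ?_⟩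
        intro a ha b hb
        simp only [List.mem_singleton] at hb
        exact hb ▸ hlt a ha
      have hle' : ∀ a ∈ acc ++ [x], ∀ z ∈ xs, a ≤ z := by
        intro a ha z hz
        rcases List.mem_append.mp ha with h | h
        · exact hle a h z (by simp [hz])
        · simp at h; exact h ▸ hxle z hz
      obtain ⟨h1, h2⟩ := ih (acc ++ [x]) hxs' hacc' hle'
      rw [if_pos hc]
      refine ⟨h1, fun y => ?_⟩
      rw [h2]; simp [or_assoc]
    · -- skip: x equals acc's last, so x ∈ acc
      have hnil : acc ≠ [] := fun h => hc (Or.inl h)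
      have hl : acc.getLast? = some x := by
        by_contra h
        exact hc (Or.inr h)
      have hxacc : x ∈ acc := List.mem_of_getLast? hl
      have hle' : ∀ a ∈ acc, ∀ z ∈ xs, a ≤ z := fun a ha z hz => hle a ha z (by simp [hz])
      obtain ⟨h1, h2⟩ := ih acc hxs' hacc hle'
      rw [if_neg (by simp [hnil, hl])]
      refine ⟨h1, fun y => ?_⟩
      rw [h2]
      simp only [List.mem_cons]
      constructor
      · rintro (h | h)
        · exact Or.inl h
        · exact Or.inr (Or.inr h)
      · rintro (h | rfl | h)
        · exact Or.inl h
        · exact Or.inl hxacc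
        · exact Or.inr h

-- ===== VERDICT (by name: the statement is the Claim_ definition above) =====
theorem possible_cell_values_spec : Claim_equal_possible_cell_values := by
  intro combinations _
  unfold Spec_possible_cell_values possible_cell_values possible_cell_values_alt
  set flat := combinations.flatMap (fun c => c) with hflat
  rw [pvA_flatten combinations [], List.nil_append]
  set uniq := flat.foldl (fun u n => if n ∈ u then u else u ++ [n]) [] with huniq
  obtain ⟨hNodupA, hMemA⟩ := pvA_dedup_spec flat [] List.nodup_nil
  set sflat := PySem.List.sorted flat (fun x => x) false with hsflat
  have hsp : sflat.Pairwise (· ≤ ·) := PySem.List.sorted_pairwise flat (fun x => x)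
  obtain ⟨hIncB, hMemB⟩ := pvB_pass_spec sflat [] hsp List.Pairwise.nil (by simp)
  set res := sflat.foldl (fun r n => if r = [] ∨ r.getLast? ≠ some n then r ++ [n] else r) [] with hres
  -- res is a strictly increasing permutation of uniq, so sorted uniq = res
  apply PySem.List.sorted_eq_of_perm_of_pairwise_lt
  · rw [List.perm_ext_iff_of_nodup hIncB.nodup hNodupA]
    intro a
    rw [hMemB a, hMemA a]
    simp [hsflat, PySem.List.mem_sorted]
  · exact hIncB
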